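-- pv_equiv track=rewrite | github.com/devgin23/masterCote | Programmers/printer.py | solution
-- ===== SOURCE A (Python) =====
-- from collections import deque
-- from collections import defaultdict
--
-- def solution(priorities, location):
--
--     answer = 0
--     # make number of priority dict
--     dictPrio = defaultdict(int)
--     for i in priorities:
--         dictPrio[i] += 1
--     # make priority que
--     que = deque(priorities)
--     # make index que
--     index = deque(range(len(que)))
--     while que :
--         flagPass = False
--         nowPrint = que[0]
--         index0 = -1
--         for i in range(nowPrint+1,10):
--             if dictPrio[i]>0:
--                 flagPass = True
--         if flagPass :
--             que.rotate(-1)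
--             index.rotate(-1)
--         else :
--             dictPrio[que.popleft()] += -1
--             answer += 1
--             index0 = index.popleft()
--
--         if index0 == location and flagPass == False:
--             break
--     return answer
-- ===== SOURCE B (Python) =====
-- def solution(priorities, location):
--     # Threshold sweep: only priorities below ten can hold a document back, so while the
--     # highest single-digit priority left in the queue is `top`, exactly the documents with
--     # priority >= top are printable.  One cyclic pass per threshold prints them in queue
--     # order until the last document of priority `top` is gone; the documents it skipped
--     # wait at the back of the queue for the next threshold.
--     queue = list(range(len(priorities)))
--     printed = 0
--     for top in sorted({q for q in priorities if q < 10}, reverse=True):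
--         todo = sum(1 for i in queue if priorities[i] == top)
--         skipped = []
--         k = 0
--         while todo > 0:
--             i = queue[k]
--             k += 1
--             if priorities[i] >= top:
--                 printed += 1
--                 if i == location:
--                     return printed
--                 if priorities[i] == top:
--                     todo -= 1
--             else:
--                 skipped.append(i)
--         queue = queue[k:] + skipped
--     for i in queue:
--         printed += 1
--         if i == location:
--             return printed
--     return printed
-- ===== Notes on version B (the rewrite author's own statement) =====
-- stated objective: faster
-- what changed: Replaces the one-rotation-at-a-time deque simulation (with a counting dict probed on every step) by a descending threshold sweep: for each distinct priority below ten, one cyclic pass over the queue prints every document at or above the threshold until the last document of that priority, then the skipped documents wait at the back; the rank of the target is read off during its pass.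
import Mathlib
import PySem

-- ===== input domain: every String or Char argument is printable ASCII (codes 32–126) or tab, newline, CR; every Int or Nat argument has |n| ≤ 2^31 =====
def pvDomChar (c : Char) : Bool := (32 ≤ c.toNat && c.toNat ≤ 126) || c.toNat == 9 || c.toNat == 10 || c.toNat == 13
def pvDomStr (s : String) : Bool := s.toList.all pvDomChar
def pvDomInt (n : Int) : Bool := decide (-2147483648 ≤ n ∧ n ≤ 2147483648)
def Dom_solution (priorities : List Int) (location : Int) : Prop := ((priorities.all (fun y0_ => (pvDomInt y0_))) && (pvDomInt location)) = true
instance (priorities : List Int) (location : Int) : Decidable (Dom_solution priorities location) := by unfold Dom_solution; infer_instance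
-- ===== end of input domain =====

-- B replaces A's one-rotation-at-a-time deque simulation by a descending threshold sweep:
-- one cyclic pass per distinct priority below ten (only those can hold a document back) prints
-- every document at or above the threshold; equal to A on every input.


-- ===== PORT A =====
-- while-loop of A; fuel (n+1)^2 bounds the iterations (each pop is preceded by < n rotations).
-- `dictPrio[i]` on the defaultdict inserts a 0 for missing keys; this never changes any later
-- lookup value, so the port reads with getD and skips the silent 0-insertions.
def solutionLoop (location : Int) : Nat → PySem.Dict Int Int → List Int → List Int → Int → Int
  | 0, _, _, _, answer => answer
  | fuel+1, dictPrio, que, index, answer =>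
    match que with
    | [] => answer
    | nowPrint :: rest =>
      let flagPass := (PySem.List.pyRange (nowPrint+1) 10 1).any (fun i => decide (0 < dictPrio.getD i 0))
      if flagPass then
        -- que.rotate(-1); index.rotate(-1); index0 stays -1
        if (-1 : Int) = location ∧ flagPass = false then answer
        else solutionLoop location fuel dictPrio (rest ++ [nowPrint]) (index.drop 1 ++ index.take 1) answer
      else
        -- dictPrio[que.popleft()] += -1; answer += 1; index0 = index.popleft()
        let dictPrio' := dictPrio.modify nowPrint 0 (· + (-1))
        match index with
        | [] => answer + 1  -- index.popleft() would raise; unreachable: index and que always have equal length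
        | index0 :: index' =>
          if index0 = location ∧ flagPass = false then answer + 1
          else solutionLoop location fuel dictPrio' rest index' (answer + 1)

def solution (priorities : List Int) (location : Int) : Int :=
  let dictPrio := priorities.foldl (fun d i => d.modify i 0 (· + 1)) PySem.Dict.empty
  let que := priorities
  let index := PySem.List.pyRange 0 priorities.length 1
  solutionLoop location ((que.length + 1) * (que.length + 1)) dictPrio que index 0

-- ===== PORT B =====
-- priorities[i] is read with pyGetD: every index in the queue comes from range(len(priorities)),
-- so the lookup never leaves the list (default never used)
-- while todo > 0: …  — structural recursion on the queue (pointer k becomes the consumed prefix);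
-- queue exhausted with todo > 0 is Python's unreachable IndexError state (todo counts occurrences
-- of `top` inside the queue), the port returns the state there
def passLoop (priorities : List Int) (location top : Int) :
    List Int → Int → List Int → Int → Option Int × List Int × List Int × Int
  | queue, todo, skipped, printed =>
    if todo ≤ 0 then (none, queue, skipped, printed)
    else
      match queue with
      | [] => (none, [], skipped, printed)
      | i :: rest =>
        if top ≤ PySem.List.pyGetD priorities i 0 then
          if i = location then (some (printed + 1), rest, skipped, printed + 1)
          else passLoop priorities location top rest
            (todo - (if PySem.List.pyGetD priorities i 0 = top then 1 else 0)) skipped (printed + 1)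
        else passLoop priorities location top rest todo (skipped ++ [i]) printed

-- final `for i in queue:` loop once no single-digit priority is left
def tailLoop (location : Int) : List Int → Int → Int
  | [], printed => printed
  | i :: rest, printed =>
    if i = location then printed + 1 else tailLoop location rest (printed + 1)

-- for top in sorted({q for q in priorities if q < 10}, reverse=True): …
def sweepLoop (priorities : List Int) (location : Int) : List Int → List Int → Int → Int
  | [], queue, printed => tailLoop location queue printed
  | top :: levels, queue, printed =>
    let todo : Int := (queue.countP (fun i => PySem.List.pyGetD priorities i 0 == top) : Int)
    match passLoop priorities location top queue todo [] printed with
    | (some ans, _, _, _) => ans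
    | (none, rest, skipped, printed') =>
        sweepLoop priorities location levels (rest ++ skipped) printed'

def solution_alt (priorities : List Int) (location : Int) : Int :=
  sweepLoop priorities location
    (PySem.List.sorted (PySem.Set.ofList (priorities.filter (fun q => decide (q < 10)))) (fun x => x) true)
    (PySem.List.pyRange 0 priorities.length 1) 0

-- ===== PRECONDITION & SPEC =====
def Spec_solution (priorities : List Int) (location : Int) (out : Int) : Prop := out = solution_alt priorities location
instance (priorities : List Int) (location : Int) (out : Int) : Decidable (Spec_solution priorities location out) := by unfold Spec_solution; infer_instance

-- ===== CLAIM (what is proved, stated in full; the proofs are below) =====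
def Claim_equal_solution : Prop := ∀ (priorities : List Int) (location : Int), Dom_solution priorities location → Spec_solution priorities location (solution priorities location)

-- ===== LEMMAS AND PROOFS =====

-- The clean simulation on (index, priority) pairs that A's loop computes.
def simLoop (location : Int) : Nat → List (Int × Int) → Int → Int
  | 0, _, answer => answer
  | _+1, [], answer => answer
  | fuel+1, (i, p) :: rest, answer =>
    if rest.any (fun e => decide (p < e.2 ∧ e.2 < 10)) then simLoop location fuel (rest ++ [(i, p)]) answer
    else if i = location then answer + 1 else simLoop location fuel rest (answer + 1)

-- Rotation-free reference: jump straight to the first maximal-priority element.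
def refLoop (location : Int) : Nat → List (Int × Int) → Int → Int
  | 0, _, answer => answer
  | n+1, Q, answer =>
    match Q.dropWhile (fun x => Q.any (fun y => decide (x.2 < y.2 ∧ y.2 < 10))) with
    | [] => answer
    | e :: post =>
      if e.1 = location then answer + 1
      else refLoop location n
        (post ++ Q.takeWhile (fun x => Q.any (fun y => decide (x.2 < y.2 ∧ y.2 < 10)))) (answer + 1)

-- cyclic arrangement of the remaining documents R (sorted by index) from threshold s
def arr (R : List (Int × Int)) (s : Int) : List (Int × Int) :=
  R.filter (fun e => decide (s ≤ e.1)) ++ R.filter (fun e => decide (e.1 < s))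

theorem flag_eq (d : PySem.Dict Int Int) (p : Int) (rest : List Int)
    (hcnt : ∀ v : Int, d.getD v 0 = ((p :: rest).count v : Int)) :
    ((PySem.List.pyRange (p+1) 10 1).any (fun i => decide (0 < d.getD i 0)))
      = rest.any (fun q => decide (p < q ∧ q < 10)) := by
  rw [Bool.eq_iff_iff, List.any_eq_true, List.any_eq_true]
  constructor
  · rintro ⟨i, hi, hpos⟩
    rw [PySem.List.mem_pyRange_one] at hi
    rw [hcnt] at hpos
    simp only [decide_eq_true_eq] at hpos ⊢
    have hmem : i ∈ p :: rest := List.count_pos_iff.mp (by exact_mod_cast hpos)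
    rcases List.mem_cons.mp hmem with h | h
    · omega
    · exact ⟨i, h, by omega, by omega⟩
  · rintro ⟨q, hq, hpq⟩
    simp only [decide_eq_true_eq] at hpq
    refine ⟨q, ?_, ?_⟩
    · rw [PySem.List.mem_pyRange_one]
      omega
    · rw [hcnt]
      simp only [decide_eq_true_eq]
      exact_mod_cast List.count_pos_iff.mpr (List.mem_cons_of_mem _ hq)

theorem loop_eq_sim (location : Int) : ∀ (fuel : Nat) (d : PySem.Dict Int Int)
    (que index : List Int) (answer : Int),
    index.length = que.length →
    (∀ v : Int, d.getD v 0 = (que.count v : Int)) →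
    solutionLoop location fuel d que index answer = simLoop location fuel (index.zip que) answer := by
  intro fuel
  induction fuel with
  | zero => intros; rfl
  | succ fuel ih =>
    intro d que index answer hlen hcnt
    match que, index with
    | [], _ => simp [solutionLoop, simLoop, List.zip_nil_right]
    | p :: rest, [] => simp at hlen
    | p :: rest, i0 :: irest =>
      simp only [List.length_cons, Nat.add_left_inj] at hlen
      have hzip : (i0 :: irest).zip (p :: rest) = (i0, p) :: irest.zip rest := rfl
      have hany : (irest.zip rest).any (fun e => decide (p < e.2 ∧ e.2 < 10))
          = rest.any (fun q => decide (p < q ∧ q < 10)) := by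
        have : rest = (irest.zip rest).map Prod.snd := (List.map_snd_zip (by omega)).symm
        rw [Bool.eq_iff_iff, List.any_eq_true, List.any_eq_true]
        constructor
        · rintro ⟨e, he, hp⟩
          exact ⟨e.2, by rw [this]; exact List.mem_map_of_mem he, hp⟩
        · rintro ⟨q, hq, hp⟩
          rw [this] at hq
          obtain ⟨e, he, rfl⟩ := List.mem_map.mp hq
          exact ⟨e, he, hp⟩
      rw [hzip]
      simp only [solutionLoop, simLoop]
      rw [flag_eq d p rest hcnt, hany]
      cases hf : rest.any (fun q => decide (p < q ∧ q < 10)) with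
      | true =>
        simp only [if_true]
        have : ¬((-1 : Int) = location ∧ true = false) := by simp
        rw [if_neg this]
        have hz : (irest ++ [i0]).zip (rest ++ [p]) = irest.zip rest ++ [(i0, p)] :=
          List.zip_append (by omega)
        have := ih d (rest ++ [p]) (irest ++ [i0]) answer
          (by simp; omega)
          (by intro v; rw [hcnt]
              exact_mod_cast (((List.perm_append_singleton p rest).count_eq v).symm))
        simpa [List.drop_one, hz] using this
      | false =>
        simp only [if_false, Bool.false_eq_true]
        have hcnt' : ∀ v : Int, (d.modify p 0 (· + (-1))).getD v 0 = (rest.count v : Int) := by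
          intro v
          rw [PySem.Dict.getD_modify]
          by_cases hv : v = p
          · subst hv; rw [if_pos rfl, hcnt, List.count_cons_self]; push_cast; ring
          · rw [if_neg hv, hcnt, List.count_cons_of_ne (fun h => hv h.symm)]
        by_cases hloc : i0 = location
        · subst hloc
          rw [if_pos ⟨rfl, trivial⟩, if_pos rfl]
        · rw [if_neg (by simp [hloc]), if_neg hloc]
          exact ih _ rest irest (answer + 1) hlen hcnt'

theorem rotate_to_max (location : Int) : ∀ (pre : List (Int × Int)) (e : Int × Int)
    (post : List (Int × Int)) (fuel : Nat) (answer : Int),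
    (∀ x ∈ pre, ∃ y ∈ pre ++ e :: post, x.2 < y.2 ∧ y.2 < 10) →
    (∀ y ∈ pre ++ e :: post, ¬(e.2 < y.2 ∧ y.2 < 10)) →
    simLoop location (pre.length + 1 + fuel) (pre ++ e :: post) answer
      = if e.1 = location then answer + 1 else simLoop location fuel (post ++ pre) (answer + 1) := by
  intro pre
  induction pre with
  | nil =>
    intro e post fuel answer _ hle
    obtain ⟨i, p⟩ := e
    have hn : (List.length ([] : List (Int × Int))) + 1 + fuel = fuel + 1 := by simp; omega
    rw [hn, List.nil_append]
    simp only [simLoop]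
    have hany : (post.any fun x => decide (p < x.2 ∧ x.2 < 10)) = false := by
      rw [Bool.eq_false_iff]
      intro h
      obtain ⟨y, hy, hpy⟩ := List.any_eq_true.mp h
      have := hle y (List.mem_cons_of_mem _ hy)
      simp only [decide_eq_true_eq] at hpy
      exact this hpy
    rw [hany]
    simp [List.append_nil]
  | cons x pre ih =>
    intro e post fuel answer hblk hle
    obtain ⟨j, q⟩ := x
    have hn : ((j, q) :: pre).length + 1 + fuel = (pre.length + 1 + fuel) + 1 := by
      simp; omega
    rw [hn, List.cons_append]
    simp only [simLoop]
    have hany : ((pre ++ e :: post).any fun x => decide (q < x.2 ∧ x.2 < 10)) = true := by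
      obtain ⟨y, hy, hy1, hy2⟩ := hblk (j, q) List.mem_cons_self
      have hy2' : y ∈ (j, q) :: (pre ++ e :: post) := by
        rw [← List.cons_append]
        exact hy
      rcases List.mem_cons.mp hy2' with rfl | hy'
      · simp at hy1
      · exact List.any_eq_true.mpr ⟨y, hy', by simp only [decide_eq_true_eq]; exact ⟨hy1, hy2⟩⟩
    rw [hany]
    simp only [if_true]
    have hassoc : (pre ++ e :: post) ++ [(j, q)] = pre ++ e :: (post ++ [(j, q)]) := by simp
    rw [hassoc]
    have hmem_iff : ∀ z : Int × Int, z ∈ pre ++ e :: (post ++ [(j, q)])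
        ↔ z ∈ (j, q) :: pre ++ e :: post := by
      intro z
      simp only [List.mem_append, List.mem_cons, List.cons_append, List.mem_singleton]
      tauto
    have hblk' : ∀ x ∈ pre, ∃ y ∈ pre ++ e :: (post ++ [(j, q)]), x.2 < y.2 ∧ y.2 < 10 := by
      intro x hx
      obtain ⟨y, hy, hy12⟩ := hblk x (List.mem_cons_of_mem _ hx)
      exact ⟨y, (hmem_iff y).mpr (by simpa using hy), hy12⟩
    have hle' : ∀ y ∈ pre ++ e :: (post ++ [(j, q)]), ¬(e.2 < y.2 ∧ y.2 < 10) := by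
      intro y hy
      exact hle y (by simpa using (hmem_iff y).mp hy)
    rw [ih e (post ++ [(j, q)]) fuel answer hblk' hle']
    have : (post ++ [(j, q)]) ++ pre = post ++ (j, q) :: pre := by simp
    rw [this]

theorem exists_max_snd : ∀ (l : List (Int × Int)), l ≠ [] → ∃ x ∈ l, ∀ y ∈ l, y.2 ≤ x.2 := by
  intro l
  induction l with
  | nil => intro h; exact absurd rfl h
  | cons a t ih =>
    intro _
    rcases eq_or_ne t [] with rfl | ht
    · refine ⟨a, List.mem_cons_self, ?_⟩
      intro y hy
      rcases List.mem_cons.mp hy with rfl | h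
      · exact le_refl _
      · simp at h
    · obtain ⟨x, hx, hmax⟩ := ih ht
      rcases le_total x.2 a.2 with h | h
      · exact ⟨a, List.mem_cons_self, by
          intro y hy
          rcases List.mem_cons.mp hy with rfl | hy'
          · exact le_refl _
          · exact le_trans (hmax y hy') h⟩
      · exact ⟨x, List.mem_cons_of_mem _ hx, by
          intro y hy
          rcases List.mem_cons.mp hy with rfl | hy'
          · exact h
          · exact hmax y hy'⟩

theorem exists_eligible : ∀ (l : List (Int × Int)), l ≠ [] →
    ∃ x ∈ l, ∀ y ∈ l, ¬(x.2 < y.2 ∧ y.2 < 10) := by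
  intro l hne
  rcases hl9 : l.filter (fun x => decide (x.2 < 10)) with _ | ⟨a, t⟩
  · obtain ⟨x, hx⟩ := List.exists_mem_of_ne_nil l hne
    refine ⟨x, hx, ?_⟩
    intro y hy ⟨_, hy10⟩
    have := List.filter_eq_nil_iff.mp hl9 y hy
    simp only [decide_eq_true_eq] at this
    exact this hy10
  · obtain ⟨x, hx, hmax⟩ := exists_max_snd (a :: t) (by simp)
    rw [← hl9] at hx hmax
    refine ⟨x, (List.mem_filter.mp hx).1, ?_⟩
    intro y hy ⟨h1, h2⟩
    have hyf : y ∈ l.filter (fun x => decide (x.2 < 10)) :=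
      List.mem_filter.mpr ⟨hy, by simpa using h2⟩
    have := hmax y hyf
    omega

theorem sim_eq_ref (location : Int) : ∀ (n fuel : Nat) (Q : List (Int × Int)) (answer : Int),
    Q.length = n → n * n < fuel →
    simLoop location fuel Q answer = refLoop location n Q answer := by
  intro n
  induction n using Nat.strong_induction_on with
  | _ n ih =>
    intro fuel Q answer hlen hfuel
    match Q with
    | [] =>
      obtain rfl : n = 0 := by simpa using hlen.symm
      obtain ⟨f, rfl⟩ : ∃ f, fuel = f + 1 := ⟨fuel - 1, by omega⟩
      rfl
    | a :: t =>
      obtain ⟨m, rfl⟩ : ∃ m, n = m + 1 := ⟨n - 1, by simp at hlen; omega⟩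
      set Q := a :: t with hQ
      set P : Int × Int → Bool := fun x => Q.any (fun y => decide (x.2 < y.2 ∧ y.2 < 10)) with hP
      obtain ⟨e, post, hdw⟩ : ∃ e post, Q.dropWhile P = e :: post := by
        rcases hdwn : Q.dropWhile P with _ | ⟨e, post⟩
        · exfalso
          obtain ⟨x, hx, hxel⟩ := exists_eligible Q (by simp [hQ])
          have hPx := List.dropWhile_eq_nil_iff.mp hdwn x hx
          obtain ⟨y, hy, hxy⟩ := List.any_eq_true.mp hPx
          simp only [decide_eq_true_eq] at hxy
          exact hxel y hy hxy
        · exact ⟨e, post, rfl⟩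
      have hPe : P e = false := by
        have h := List.head?_dropWhile_not P Q
        rw [hdw] at h
        exact h
      have hle : ∀ y ∈ Q, ¬(e.2 < y.2 ∧ y.2 < 10) := by
        intro y hy hc
        have : P e = true := List.any_eq_true.mpr ⟨y, hy, by simpa using hc⟩
        rw [hPe] at this; exact absurd this (by simp)
      have hsplit : Q.takeWhile P ++ e :: post = Q := by
        rw [← hdw]; exact List.takeWhile_append_dropWhile
      have hblk : ∀ x ∈ Q.takeWhile P, ∃ y ∈ Q.takeWhile P ++ e :: post, x.2 < y.2 ∧ y.2 < 10 := by
        intro x hx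
        have hPx := List.mem_takeWhile_imp hx
        obtain ⟨y, hy, hxy⟩ := List.any_eq_true.mp hPx
        simp only [decide_eq_true_eq] at hxy
        exact ⟨y, by rw [hsplit]; exact hy, hxy⟩
      have hpre_len : (Q.takeWhile P).length < m + 1 := by
        have := congrArg List.length hsplit
        simp at this
        omega
      obtain ⟨f, hf⟩ : ∃ f, fuel = (Q.takeWhile P).length + 1 + f :=
        ⟨fuel - (Q.takeWhile P).length - 1, by
          have hmm : (m + 1) * (m + 1) = m * m + m + m + 1 := by ring
          omega⟩
      have hle' : ∀ y ∈ Q.takeWhile P ++ e :: post, ¬(e.2 < y.2 ∧ y.2 < 10) := by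
        rw [hsplit]; exact hle
      have hsim : simLoop location fuel Q answer
          = if e.1 = location then answer + 1
            else simLoop location f (post ++ Q.takeWhile P) (answer + 1) := by
        conv_lhs => rw [← hsplit, hf]
        exact rotate_to_max location (Q.takeWhile P) e post f answer hblk hle'
      have href : refLoop location (m + 1) Q answer
          = if e.1 = location then answer + 1
            else refLoop location m (post ++ Q.takeWhile P) (answer + 1) := by
        simp only [refLoop, ← hP]
        rw [hdw]
      rw [hsim, href]
      by_cases hloc : e.1 = location
      · rw [if_pos hloc, if_pos hloc]
      · rw [if_neg hloc, if_neg hloc]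
        apply ih m (by omega) f (post ++ Q.takeWhile P) (answer + 1)
        · have := congrArg List.length hsplit
          simp at this ⊢
          omega
        · have hmm : (m + 1) * (m + 1) = m * m + m + m + 1 := by ring
          omega

theorem fst_inj (R : List (Int × Int)) (hp : R.Pairwise (fun a b => a.1 < b.1)) :
    ∀ x ∈ R, ∀ y ∈ R, x.1 = y.1 → x = y := by
  induction R with
  | nil => intro x hx; simp at hx
  | cons a t ih =>
    rcases List.pairwise_cons.mp hp with ⟨ha, ht⟩
    intro x hx y hy hxy
    rcases List.mem_cons.mp hx with rfl | hx' <;> rcases List.mem_cons.mp hy with rfl | hy'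
    · rfl
    · exact absurd (ha y hy') (by omega)
    · exact absurd (ha x hx') (by omega)
    · exact ih ht x hx' y hy' hxy

-- sorted-by-index lists: a filter splits at any threshold t on the index
theorem split_filter (t : Int) : ∀ (R : List (Int × Int)) (P : Int × Int → Bool),
    R.Pairwise (fun a b => a.1 < b.1) →
    R.filter P = R.filter (fun x => P x && decide (x.1 < t))
      ++ R.filter (fun x => P x && decide (t ≤ x.1)) := by
  intro R
  induction R with
  | nil => intros; rfl
  | cons a R ih =>
    intro P hp
    rcases List.pairwise_cons.mp hp with ⟨ha, hR⟩
    rw [List.filter_cons, List.filter_cons, List.filter_cons]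
    by_cases hPa : P a = true
    · by_cases hat : a.1 < t
      · have c1 : (P a && decide (a.1 < t)) = true := by simp [hPa, hat]
        have c2 : (P a && decide (t ≤ a.1)) = false := by
          simp [show ¬(t ≤ a.1) by omega]
        rw [c1, c2, hPa]
        simp only [if_true, if_false]
        rw [ih P hR]
        simp
      · have c1 : (P a && decide (a.1 < t)) = false := by
          simp [show ¬(a.1 < t) by omega]
        have c2 : (P a && decide (t ≤ a.1)) = true := by simp [hPa]; omega
        rw [c1, c2, hPa]
        simp only [if_true, if_false]
        have hfst : R.filter (fun x => P x && decide (x.1 < t)) = [] := by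
          rw [List.filter_eq_nil_iff]
          intro x hx
          have := ha x hx
          simp only [Bool.and_eq_true, decide_eq_true_eq, not_and]
          intro _; omega
        rw [ih P hR, hfst]
        simp only [Bool.false_eq_true, if_false, List.nil_append]
    · have hPa' : P a = false := Bool.eq_false_iff.mpr hPa
      have c1 : (P a && decide (a.1 < t)) = false := by simp [hPa']
      have c2 : (P a && decide (t ≤ a.1)) = false := by simp [hPa']
      rw [c1, c2, hPa']
      simp only [Bool.false_eq_true, if_false]
      exact ih P hR

theorem filter_eq_singleton_of_mem (R : List (Int × Int)) (e : Int × Int)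
    (hp : R.Pairwise (fun a b => a.1 < b.1)) (he : e ∈ R) :
    R.filter (fun x => decide (x.1 = e.1)) = [e] := by
  induction R with
  | nil => simp at he
  | cons a t ih =>
    rcases List.pairwise_cons.mp hp with ⟨ha, ht⟩
    rcases List.mem_cons.mp he with rfl | he'
    · simp only [List.filter_cons, decide_true, if_true]
      have : t.filter (fun x => decide (x.1 = e.1)) = [] := by
        rw [List.filter_eq_nil_iff]
        intro x hx
        have := ha x hx
        simp only [decide_eq_true_eq]
        omega
      rw [this]
    · have hane : (decide (a.1 = e.1)) = false := by
        have := ha e he'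
        simp only [decide_eq_false_iff_not]
        omega
      simp only [List.filter_cons, hane, if_false]
      exact ih ht he'

theorem append_cons_unique {α : Type} (e : α) : ∀ (u u' v v' : List α),
    u ++ e :: v = u' ++ e :: v' → e ∉ u → e ∉ u' → u = u' ∧ v = v' := by
  intro u
  induction u with
  | nil =>
    intro u' v v' heq _ heu'
    cases u' with
    | nil => exact ⟨rfl, by simpa using heq⟩
    | cons x u'' =>
      exfalso
      have : e = x := by simpa using congrArg (·.head?) heq
      exact heu' (this ▸ List.mem_cons_self)
  | cons x u₀ ih =>
    intro u' v v' heq heu heu'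
    cases u' with
    | nil =>
      exfalso
      have : x = e := by simpa using congrArg (·.head?) heq
      exact heu (this ▸ List.mem_cons_self)
    | cons x' u'' =>
      have hx : x = x' := by simpa using congrArg (·.head?) heq
      subst hx
      have htl : u₀ ++ e :: v = u'' ++ e :: v' := by simpa using congrArg (·.tail) heq
      obtain ⟨h1, h2⟩ := ih u'' v v' htl (fun h => heu (List.mem_cons_of_mem _ h))
        (fun h => heu' (List.mem_cons_of_mem _ h))
      exact ⟨by rw [h1], h2⟩

theorem mem_arr (R : List (Int × Int)) (s : Int) (x : Int × Int) :
    x ∈ arr R s ↔ x ∈ R := by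
  unfold arr
  refine ⟨fun h => ?_, fun h => ?_⟩
  · rcases List.mem_append.mp h with h | h <;> exact List.mem_filter.mp h |>.1
  · rcases le_or_gt s x.1 with hs | hs
    · exact List.mem_append_left _ (List.mem_filter.mpr ⟨h, by simpa using hs⟩)
    · exact List.mem_append_right _ (List.mem_filter.mpr ⟨h, by simpa using hs⟩)

-- the CYCLE lemma: popping the first maximal element e from the cyclic arrangement leaves
-- exactly the cyclic arrangement of R minus e, restarted after e's index
theorem cycle (R : List (Int × Int)) (e : Int × Int) (s : Int) (l₁ l₂ : List (Int × Int))
    (hp : R.Pairwise (fun a b => a.1 < b.1)) (he : e ∈ R)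
    (hdecomp : arr R s = l₁ ++ e :: l₂) (hel1 : e ∉ l₁) :
    l₂ ++ l₁ = arr (R.filter (fun x => decide (x ≠ e))) (e.1 + 1) := by
  have hinj := fst_inj R hp
  have hB1 : (R.filter (fun x => decide (x ≠ e))).filter (fun x => decide (e.1 + 1 ≤ x.1))
      = R.filter (fun x => decide (e.1 < x.1)) := by
    rw [List.filter_filter]
    apply List.filter_congr
    intro x hx
    by_cases h : e.1 < x.1
    · have hne : x ≠ e := fun hc => by subst hc; omega
      simp [hne, show e.1 + 1 ≤ x.1 by omega, h]
    · simp [show ¬(e.1 + 1 ≤ x.1) by omega, h]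
  have hB2 : (R.filter (fun x => decide (x ≠ e))).filter (fun x => decide (x.1 < e.1 + 1))
      = R.filter (fun x => decide (x.1 < e.1)) := by
    rw [List.filter_filter]
    apply List.filter_congr
    intro x hx
    by_cases h : x.1 < e.1
    · have hne : x ≠ e := fun hc => by subst hc; omega
      simp [hne, show x.1 < e.1 + 1 by omega, h]
    · by_cases hx1 : x.1 = e.1
      · have hxe : x = e := hinj x hx e he hx1
        subst hxe
        simp [h]
      · simp [show ¬(x.1 < e.1 + 1) by omega, h]
  have harr' : arr (R.filter (fun x => decide (x ≠ e))) (e.1 + 1)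
      = R.filter (fun x => decide (e.1 < x.1)) ++ R.filter (fun x => decide (x.1 < e.1)) := by
    unfold arr
    rw [hB1, hB2]
  rw [harr']
  rcases le_or_gt s e.1 with hs | hs
  · have hsplitA1 : R.filter (fun x => decide (s ≤ x.1))
        = R.filter (fun x => decide (s ≤ x.1) && decide (x.1 < e.1))
          ++ e :: R.filter (fun x => decide (s ≤ x.1) && decide (e.1 < x.1)) := by
      rw [split_filter e.1 R _ hp]
      congr 1
      rw [split_filter (e.1 + 1) R _ hp]
      have h1 : R.filter (fun x => (decide (s ≤ x.1) && decide (e.1 ≤ x.1)) && decide (x.1 < e.1 + 1))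
          = [e] := by
        rw [show (fun x : Int × Int => (decide (s ≤ x.1) && decide (e.1 ≤ x.1)) && decide (x.1 < e.1 + 1))
            = (fun x : Int × Int => decide (x.1 = e.1)) from ?_]
        · exact filter_eq_singleton_of_mem R e hp he
        · funext x
          by_cases h : x.1 = e.1 <;> simp [h] <;> omega
      have h2 : R.filter (fun x => (decide (s ≤ x.1) && decide (e.1 ≤ x.1)) && decide (e.1 + 1 ≤ x.1))
          = R.filter (fun x => decide (s ≤ x.1) && decide (e.1 < x.1)) := by
        apply List.filter_congr
        intro x _
        by_cases h1 : s ≤ x.1 <;> by_cases h2 : e.1 < x.1 <;> simp [h1, h2] <;> omega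
      rw [h1, h2]
      try rfl
    have hdecomp2 : arr R s
        = R.filter (fun x => decide (s ≤ x.1) && decide (x.1 < e.1))
          ++ e :: (R.filter (fun x => decide (s ≤ x.1) && decide (e.1 < x.1))
                    ++ R.filter (fun x => decide (x.1 < s))) := by
      unfold arr
      rw [hsplitA1]
      try simp
    have hnotmem : e ∉ R.filter (fun x => decide (s ≤ x.1) && decide (x.1 < e.1)) := by
      intro h
      have := (List.mem_filter.mp h).2
      simp at this
      try omega
    obtain ⟨hu, hv⟩ := append_cons_unique e _ _ _ _ (hdecomp.symm.trans hdecomp2) hel1 hnotmem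
    subst hu hv
    have hD : R.filter (fun x => decide (s ≤ x.1) && decide (e.1 < x.1))
        = R.filter (fun x => decide (e.1 < x.1)) := by
      apply List.filter_congr
      intro x _
      by_cases h : e.1 < x.1 <;> simp [h] <;> omega
    have hC : R.filter (fun x => decide (x.1 < e.1))
        = R.filter (fun x => decide (x.1 < e.1) && decide (x.1 < s))
          ++ R.filter (fun x => decide (x.1 < e.1) && decide (s ≤ x.1)) := by
      exact split_filter s R _ hp
    have hA2 : R.filter (fun x => decide (x.1 < e.1) && decide (x.1 < s))
        = R.filter (fun x => decide (x.1 < s)) := by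
      apply List.filter_congr
      intro x _
      by_cases h : x.1 < s <;> simp [h] <;> omega
    have hCc : R.filter (fun x => decide (x.1 < e.1) && decide (s ≤ x.1))
        = R.filter (fun x => decide (s ≤ x.1) && decide (x.1 < e.1)) := by
      apply List.filter_congr
      intro x _
      by_cases h1 : x.1 < e.1 <;> by_cases h2 : s ≤ x.1 <;> simp [h1, h2]
    rw [hD, hC, hA2, hCc]
    simp
  · have hsplitA2 : R.filter (fun x => decide (x.1 < s))
        = R.filter (fun x => decide (x.1 < e.1))
          ++ e :: R.filter (fun x => decide (x.1 < s) && decide (e.1 < x.1)) := by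
      rw [split_filter e.1 R _ hp]
      congr 1
      · apply List.filter_congr
        intro x _
        by_cases h : x.1 < e.1 <;> simp [h] <;> omega
      · rw [split_filter (e.1 + 1) R _ hp]
        have h1 : R.filter (fun x => (decide (x.1 < s) && decide (e.1 ≤ x.1)) && decide (x.1 < e.1 + 1))
            = [e] := by
          rw [show (fun x : Int × Int => (decide (x.1 < s) && decide (e.1 ≤ x.1)) && decide (x.1 < e.1 + 1))
              = (fun x : Int × Int => decide (x.1 = e.1)) from ?_]
          · exact filter_eq_singleton_of_mem R e hp he
          · funext x
            by_cases h : x.1 = e.1 <;> simp [h] <;> omega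
        have h2 : R.filter (fun x => (decide (x.1 < s) && decide (e.1 ≤ x.1)) && decide (e.1 + 1 ≤ x.1))
            = R.filter (fun x => decide (x.1 < s) && decide (e.1 < x.1)) := by
          apply List.filter_congr
          intro x _
          by_cases h1 : x.1 < s <;> by_cases h2 : e.1 < x.1 <;> simp [h1, h2] <;> omega
        rw [h1, h2]
        try rfl
      try rfl
    have hdecomp2 : arr R s
        = (R.filter (fun x => decide (s ≤ x.1)) ++ R.filter (fun x => decide (x.1 < e.1)))
          ++ e :: R.filter (fun x => decide (x.1 < s) && decide (e.1 < x.1)) := by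
      unfold arr
      rw [hsplitA2]
      try simp
    have hnotmem : e ∉ R.filter (fun x => decide (s ≤ x.1)) ++ R.filter (fun x => decide (x.1 < e.1)) := by
      intro h
      rcases List.mem_append.mp h with h | h
      · have := (List.mem_filter.mp h).2
        simp at this
        try omega
      · have := (List.mem_filter.mp h).2
        simp at this
        try omega
    obtain ⟨hu, hv⟩ := append_cons_unique e _ _ _ _ (hdecomp.symm.trans hdecomp2) hel1 hnotmem
    subst hu hv
    have hB1s : R.filter (fun x => decide (e.1 < x.1))
        = R.filter (fun x => decide (e.1 < x.1) && decide (x.1 < s))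
          ++ R.filter (fun x => decide (e.1 < x.1) && decide (s ≤ x.1)) := split_filter s R _ hp
    have hD2 : R.filter (fun x => decide (e.1 < x.1) && decide (x.1 < s))
        = R.filter (fun x => decide (x.1 < s) && decide (e.1 < x.1)) := by
      apply List.filter_congr
      intro x _
      by_cases h1 : e.1 < x.1 <;> by_cases h2 : x.1 < s <;> simp [h1, h2]
    have hA1 : R.filter (fun x => decide (e.1 < x.1) && decide (s ≤ x.1))
        = R.filter (fun x => decide (s ≤ x.1)) := by
      apply List.filter_congr
      intro x _
      by_cases h : s ≤ x.1 <;> simp [h] <;> omega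
    rw [hB1s, hD2, hA1]
    simp

theorem tw_char {α : Type} (P : α → Bool) (l l₁ l₂ : List α) (e : α)
    (hl : l = l₁ ++ e :: l₂) (h1 : ∀ x ∈ l₁, P x = true) (h2 : P e = false) :
    l.takeWhile P = l₁ ∧ l.dropWhile P = e :: l₂ := by
  subst hl
  induction l₁ with
  | nil => simp [List.takeWhile_cons, List.dropWhile_cons, h2]
  | cons a t ih =>
    have hPa := h1 a List.mem_cons_self
    obtain ⟨ih1, ih2⟩ := ih (fun x hx => h1 x (List.mem_cons_of_mem _ hx))
    refine ⟨?_, ?_⟩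
    · simp only [List.cons_append, List.takeWhile_cons, hPa, if_true]
      rw [ih1]
    · simp only [List.cons_append, List.dropWhile_cons, hPa, if_true]
      rw [ih2]

theorem length_filter_ne (R : List (Int × Int)) (e : Int × Int)
    (hp : R.Pairwise (fun a b => a.1 < b.1)) (he : e ∈ R) :
    (R.filter (fun x => decide (x ≠ e))).length + 1 = R.length := by
  have hnd : R.Nodup := List.Pairwise.imp (fun h => by
    intro hc; rw [hc] at h; exact lt_irrefl _ h) hp
  have hfe : R.filter (fun x => decide (x ≠ e)) = R.erase e := by
    rw [hnd.erase_eq_filter e]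
    apply List.filter_congr
    intro x _
    simp only [bne]
    by_cases h : x = e
    · simp [h]
    · simp [h]
  rw [hfe, List.length_erase_of_mem he]
  have hpos : 0 < R.length := List.length_pos_of_mem he
  omega

theorem length_arr (R : List (Int × Int)) (s : Int) : (arr R s).length = R.length := by
  unfold arr
  have : R.filter (fun e => decide (e.1 < s)) = R.filter (fun e => !decide (s ≤ e.1)) := by
    apply List.filter_congr
    intro x _
    by_cases h : s ≤ x.1 <;> simp [h] <;> omega
  rw [this, List.length_append]
  have := (List.filter_append_perm (fun e => decide (s ≤ e.1)) R).length_eq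
  simpa using this

theorem pyGetD_of_mem_enumerate (priorities : List Int) (x : Int × Int)
    (hx : x ∈ PySem.List.enumerate priorities 0) :
    PySem.List.pyGetD priorities x.1 0 = x.2 := by
  obtain ⟨k, hk, rfl⟩ := (PySem.List.mem_enumerate_iff priorities 0 x).mp hx
  simp only [zero_add]
  rw [PySem.List.pyGetD_natCast]
  exact List.getD_eq_getElem priorities 0 hk

-- the pass walks over a block of skipped (below-threshold) documents without printing
theorem passLoop_skips (priorities : List Int) (location top : Int) :
    ∀ (B0 tail sk : List Int) (todo printed : Int),
    0 < todo → (∀ i ∈ B0, PySem.List.pyGetD priorities i 0 < top) →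
    passLoop priorities location top (B0 ++ tail) todo sk printed
      = passLoop priorities location top tail todo (sk ++ B0) printed := by
  intro B0
  induction B0 with
  | nil => intro tail sk todo printed _ _; simp
  | cons i B0' ih =>
    intro tail sk todo printed htodo hlt
    have hi := hlt i List.mem_cons_self
    rw [List.cons_append]
    simp only [passLoop]
    rw [if_neg (by omega), if_neg (by omega)]
    rw [ih tail (sk ++ [i]) todo printed htodo (fun j hj => hlt j (List.mem_cons_of_mem _ hj))]
    rw [List.append_assoc]
    rfl

-- once no document can be blocked, printing is first-come-first-served
theorem ref_fifo (location : Int) : ∀ (Q : List (Int × Int)) (printed : Int),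
    (∀ x ∈ Q, ∀ y ∈ Q, ¬(x.2 < y.2 ∧ y.2 < 10)) →
    refLoop location Q.length Q printed = tailLoop location (Q.map (·.1)) printed := by
  intro Q
  induction Q with
  | nil => intro printed _; rfl
  | cons a t ih =>
    intro printed hfree
    have hPa : ((a :: t).any (fun y => decide (a.2 < y.2 ∧ y.2 < 10))) = false := by
      rw [Bool.eq_false_iff]
      intro h
      obtain ⟨y, hy, hxy⟩ := List.any_eq_true.mp h
      simp only [decide_eq_true_eq] at hxy
      exact hfree a List.mem_cons_self y hy hxy
    have hstep : refLoop location (a :: t).length (a :: t) printed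
        = if a.1 = location then printed + 1
          else refLoop location t.length (t ++ []) (printed + 1) := by
      rw [List.length_cons]
      simp only [refLoop]
      rw [List.dropWhile_cons, hPa]
      simp only [Bool.false_eq_true, if_false]
      rw [List.takeWhile_cons, hPa]
      simp only [Bool.false_eq_true, if_false]
    rw [hstep, List.append_nil, List.map_cons]
    simp only [tailLoop]
    by_cases hloc : a.1 = location
    · rw [if_pos hloc, if_pos hloc]
    · rw [if_neg hloc, if_neg hloc]
      exact ih (printed + 1) (fun x hx y hy => hfree x (List.mem_cons_of_mem _ hx) y
        (List.mem_cons_of_mem _ hy))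

-- one threshold pass: the pass prints, in cyclic order, every document with priority ≥ top
-- until the last document of priority top, and leaves the rest of the queue ++ the skipped
-- documents — which is again a cyclic arrangement of the remaining documents
theorem pass_eq (priorities : List Int) (location top : Int) :
    ∀ (n : Nat) (R : List (Int × Int)) (s : Int) (unvis skip : List (Int × Int))
      (todo printed : Int),
    R.length = n →
    R.Pairwise (fun a b => a.1 < b.1) →
    (∀ x ∈ R, PySem.List.pyGetD priorities x.1 0 = x.2) →
    (∀ x ∈ R, x.2 < 10 → x.2 ≤ top) →
    top < 10 →
    arr R s = unvis ++ skip →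
    (∀ x ∈ skip, x.2 < top) →
    todo = (unvis.countP (fun x => x.2 == top) : Int) →
    (∀ (ans : Int) (q sk : List Int) (pr : Int),
        passLoop priorities location top (unvis.map (·.1)) todo (skip.map (·.1)) printed
          = (some ans, q, sk, pr) →
        refLoop location R.length (arr R s) printed = ans)
    ∧ (∀ (rest skipped : List Int) (printed' : Int),
        passLoop priorities location top (unvis.map (·.1)) todo (skip.map (·.1)) printed
          = (none, rest, skipped, printed') →
        ∃ R' s', (∀ x ∈ R', x ∈ R) ∧ (∀ x ∈ R', x.2 ≠ top) ∧
          R'.Pairwise (fun a b => a.1 < b.1) ∧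
          (arr R' s').map (·.1) = rest ++ skipped ∧
          refLoop location R.length (arr R s) printed
            = refLoop location R'.length (arr R' s') printed') := by
  intro n
  induction n using Nat.strong_induction_on with
  | _ n ih =>
    intro R s unvis skip todo printed hlen hp hval hle htop10 hsplit hskip htodo
    by_cases htz : todo ≤ 0
    · have hpass : passLoop priorities location top (unvis.map (·.1)) todo (skip.map (·.1)) printed
          = (none, unvis.map (·.1), skip.map (·.1), printed) := by
        cases hu : unvis.map (·.1) with
        | nil => simp [passLoop, htz]
        | cons a t => simp [passLoop, htz]
      have hcnt0 : unvis.countP (fun x => x.2 == top) = 0 := by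
        omega
      constructor
      · intro ans q sk pr h
        rw [hpass] at h
        simp at h
      · intro rest skipped printed' h
        rw [hpass] at h
        obtain ⟨rfl, rfl, rfl⟩ : rest = unvis.map (·.1) ∧ skipped = skip.map (·.1)
            ∧ printed' = printed := by
          have h1 := congrArg (·.1) h
          have h2 := congrArg (·.2.1) h
          have h3 := congrArg (·.2.2.1) h
          have h4 := congrArg (·.2.2.2) h
          simp at h2 h3 h4
          exact ⟨h2.symm, h3.symm, h4.symm⟩
        refine ⟨R, s, fun x hx => hx, ?_, hp, by rw [hsplit]; simp, rfl⟩
        intro x hx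
        have hxa : x ∈ arr R s := (mem_arr R s x).mpr hx
        rw [hsplit] at hxa
        rcases List.mem_append.mp hxa with hxu | hxs
        · have := List.countP_eq_zero.mp hcnt0 x hxu
          simpa using this
        · have := hskip x hxs
          omega
    · -- todo > 0: there is a document of priority top ahead in the queue
      have hcntpos : 0 < unvis.countP (fun x => x.2 == top) := by omega
      obtain ⟨t0, ht0u, ht0p⟩ := List.countP_pos_iff.mp hcntpos
      have ht0top : t0.2 = top := by simpa using ht0p
      set pred : Int × Int → Bool := fun x => decide (x.2 < top) with hpred
      obtain ⟨e, rest₀, hdw⟩ : ∃ e rest₀, unvis.dropWhile pred = e :: rest₀ := by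
        rcases hd : unvis.dropWhile pred with _ | ⟨e, rest₀⟩
        · exfalso
          have := List.dropWhile_eq_nil_iff.mp hd t0 ht0u
          rw [hpred] at this
          simp [ht0top] at this
        · exact ⟨e, rest₀, rfl⟩
      set B0 := unvis.takeWhile pred with hB0
      have hB0lt : ∀ x ∈ B0, x.2 < top := by
        intro x hx
        have := List.mem_takeWhile_imp hx
        rw [hpred] at this
        simpa using this
      have hsplitu : B0 ++ e :: rest₀ = unvis := by
        rw [hB0, ← hdw]; exact List.takeWhile_append_dropWhile
      have hetop : top ≤ e.2 := by
        have h := List.head?_dropWhile_not pred unvis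
        rw [hdw] at h
        simp only [Option.all_some, hpred] at h
        simpa using h
      have hmemu : ∀ x ∈ unvis, x ∈ R := by
        intro x hx
        apply (mem_arr R s x).mp
        rw [hsplit]
        exact List.mem_append_left _ hx
      have hmemsk : ∀ x ∈ skip, x ∈ R := by
        intro x hx
        apply (mem_arr R s x).mp
        rw [hsplit]
        exact List.mem_append_right _ hx
      have heR : e ∈ R := hmemu e (by rw [← hsplitu]; exact List.mem_append_right _ List.mem_cons_self)
      have ht0R : t0 ∈ R := hmemu t0 ht0u
      -- the pass consumes B0 (all skipped), then reaches e
      have hskips : passLoop priorities location top (unvis.map (·.1)) todo (skip.map (·.1)) printed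
          = passLoop priorities location top ((e :: rest₀).map (·.1)) todo
              (skip.map (·.1) ++ B0.map (·.1)) printed := by
        conv_lhs => rw [← hsplitu]
        rw [List.map_append]
        exact passLoop_skips priorities location top (B0.map (·.1)) ((e :: rest₀).map (·.1))
          (skip.map (·.1)) todo printed (by omega)
          (by
            intro i hi
            obtain ⟨x, hx, rfl⟩ := List.mem_map.mp hi
            rw [hval x (hmemu x (by rw [← hsplitu]; exact List.mem_append_left _ hx))]
            exact hB0lt x hx)
      have hvale : PySem.List.pyGetD priorities e.1 0 = e.2 := hval e heR
      -- the reference loop also pops e next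
      set P' : Int × Int → Bool :=
        fun x => (arr R s).any (fun y => decide (x.2 < y.2 ∧ y.2 < 10)) with hP'
      have ht0arr : t0 ∈ arr R s := (mem_arr R s t0).mpr ht0R
      have hP'blk : ∀ x, x.2 < top → P' x = true := by
        intro x hx
        refine List.any_eq_true.mpr ⟨t0, ht0arr, ?_⟩
        simp only [decide_eq_true_eq]
        omega
      have hP'e : P' e = false := by
        rw [Bool.eq_false_iff]
        intro h
        obtain ⟨y, hy, hxy⟩ := List.any_eq_true.mp h
        simp only [decide_eq_true_eq] at hxy
        have := hle y ((mem_arr R s y).mp hy) hxy.2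
        omega
      have harrdec : arr R s = B0 ++ e :: (rest₀ ++ skip) := by
        rw [hsplit, ← hsplitu]
        simp
      obtain ⟨htw, hdw'⟩ := tw_char P' (arr R s) B0 (rest₀ ++ skip) e harrdec
        (fun x hx => hP'blk x (hB0lt x hx)) hP'e
      obtain ⟨k, hk⟩ : ∃ k, R.length = k + 1 :=
        ⟨R.length - 1, by have := List.length_pos_of_mem heR; omega⟩
      have hstep : refLoop location R.length (arr R s) printed
          = if e.1 = location then printed + 1
            else refLoop location k ((rest₀ ++ skip) ++ B0) (printed + 1) := by
        rw [hk]
        simp only [refLoop, ← hP']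
        rw [hdw', htw]
      have henB0 : e ∉ B0 := by
        intro h
        have := hB0lt e h
        omega
      have hcyc : (rest₀ ++ skip) ++ B0
          = arr (R.filter (fun x => decide (x ≠ e))) (e.1 + 1) := by
        have := cycle R e s B0 (rest₀ ++ skip) hp heR harrdec henB0
        simpa using this
      set R' := R.filter (fun x => decide (x ≠ e)) with hR'
      have hR'len : R'.length + 1 = R.length := by
        rw [hR']
        exact length_filter_ne R e hp heR
      have hR'sub : ∀ x ∈ R', x ∈ R := fun x hx => (List.mem_filter.mp hx).1
      have hcntsplit : unvis.countP (fun x => x.2 == top)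
          = (if e.2 = top then 1 else 0) + rest₀.countP (fun x => x.2 == top) := by
        rw [← hsplitu, List.countP_append, List.countP_cons]
        have hB00 : B0.countP (fun x => x.2 == top) = 0 := by
          rw [List.countP_eq_zero]
          intro x hx
          have := hB0lt x hx
          simp
          omega
        rw [hB00]
        by_cases h : e.2 = top <;> simp [h] <;> omega
      -- one printing step of the pass
      have hstep2 : passLoop priorities location top ((e :: rest₀).map (·.1)) todo
            (skip.map (·.1) ++ B0.map (·.1)) printed
          = if e.1 = location then
              (some (printed + 1), rest₀.map (·.1), skip.map (·.1) ++ B0.map (·.1), printed + 1)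
            else passLoop priorities location top (rest₀.map (·.1))
              (todo - (if e.2 = top then 1 else 0))
              (skip.map (·.1) ++ B0.map (·.1)) (printed + 1) := by
        rw [List.map_cons]
        simp only [passLoop]
        rw [if_neg (by omega), if_pos (by rw [hvale]; exact hetop), hvale]
      by_cases hloc : e.1 = location
      · -- the pass finds the target here
        constructor
        · intro ans q sk pr h
          rw [hskips, hstep2, if_pos hloc] at h
          have : some (printed + 1) = some ans := congrArg (·.1) h
          rw [hstep, if_pos hloc]
          exact Option.some_inj.mp this
        · intro rest skipped printed' h
          rw [hskips, hstep2, if_pos hloc] at h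
          have : (some (printed + 1) : Option Int) = none := congrArg (·.1) h
          simp at this
      · -- e is printed and the pass goes on
        have hih := ih R'.length (by omega) R' (e.1 + 1) rest₀ (skip ++ B0)
          (todo - (if e.2 = top then 1 else 0)) (printed + 1) rfl
          (hp.filter _) (fun x hx => hval x (hR'sub x hx))
          (fun x hx h10 => hle x (hR'sub x hx) h10) htop10
          (by rw [← hcyc]; simp)
          (by
            intro x hx
            rcases List.mem_append.mp hx with h | h
            · exact hskip x h
            · exact hB0lt x h)
          (by rw [htodo, hcntsplit]; push_cast; ring)
        rw [List.map_append] at hih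
        constructor
        · intro ans q sk pr h
          rw [hskips, hstep2, if_neg hloc] at h
          rw [hstep, if_neg hloc, hcyc, show k = R'.length by omega]
          exact hih.1 ans q sk pr h
        · intro rest skipped printed' h
          rw [hskips, hstep2, if_neg hloc] at h
          obtain ⟨R'', s'', hsub, hnotop, hp'', hmap, heq⟩ := hih.2 rest skipped printed' h
          refine ⟨R'', s'', fun x hx => hR'sub x (hsub x hx), hnotop, hp'', hmap, ?_⟩
          rw [hstep, if_neg hloc, hcyc, show k = R'.length by omega]
          exact heq

-- the sweep over the descending thresholds computes the reference loop
theorem sweep_eq (priorities : List Int) (location : Int) :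
    ∀ (levels : List Int) (R : List (Int × Int)) (s printed : Int),
    R.Pairwise (fun a b => a.1 < b.1) →
    (∀ x ∈ R, PySem.List.pyGetD priorities x.1 0 = x.2) →
    levels.Pairwise (· > ·) →
    (∀ c ∈ levels, c < 10) →
    (∀ x ∈ R, x.2 < 10 → x.2 ∈ levels) →
    refLoop location R.length (arr R s) printed
      = sweepLoop priorities location levels ((arr R s).map (·.1)) printed := by
  intro levels
  induction levels with
  | nil =>
    intro R s printed hp hval _ _ hinv
    have hfree : ∀ x ∈ arr R s, ∀ y ∈ arr R s, ¬(x.2 < y.2 ∧ y.2 < 10) := by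
      intro x _ y hy ⟨_, h10⟩
      have := hinv y ((mem_arr R s y).mp hy) h10
      simp at this
    have := ref_fifo location (arr R s) printed hfree
    rw [length_arr] at this
    exact this
  | cons top levels' ih =>
    intro R s printed hp hval hcl hcls10 hinv
    rcases List.pairwise_cons.mp hcl with ⟨hpp, hps⟩
    have htop10 : top < 10 := hcls10 top List.mem_cons_self
    have hle : ∀ x ∈ R, x.2 < 10 → x.2 ≤ top := by
      intro x hx h10
      rcases List.mem_cons.mp (hinv x hx h10) with h | h
      · omega
      · exact le_of_lt (hpp _ h)
    have hcnt : (((arr R s).map (·.1)).countP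
          (fun i => PySem.List.pyGetD priorities i 0 == top) : Int)
        = ((arr R s).countP (fun x => x.2 == top) : Int) := by
      rw [List.countP_map]
      congr 1
      apply List.countP_congr
      intro x hx
      rw [Function.comp_apply, hval x ((mem_arr R s x).mp hx)]
    have hpass := pass_eq priorities location top R.length R s (arr R s) [] 
      (((arr R s).map (·.1)).countP (fun i => PySem.List.pyGetD priorities i 0 == top) : Int)
      printed rfl hp hval hle htop10 (by simp) (by intro x hx; simp at hx)
      (by rw [hcnt])
    simp only [sweepLoop, List.map_nil]
    rcases hres : passLoop priorities location top ((arr R s).map (·.1))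
        (((arr R s).map (·.1)).countP (fun i => PySem.List.pyGetD priorities i 0 == top) : Int)
        [] printed with ⟨o, rest, skipped, printed'⟩
    cases o with
    | some ans =>
      rw [hres, hpass.1 ans rest skipped printed' hres]
    | none =>
      rw [hres]
      obtain ⟨R', s', hsub, hnotop, hp', hmap, heq⟩ := hpass.2 rest skipped printed' hres
      rw [heq, ih R' s' printed' hp' (fun x hx => hval x (hsub x hx)) hps
        (fun c hc => hcls10 c (List.mem_cons_of_mem _ hc))
        (by
          intro x hx h10
          rcases List.mem_cons.mp (hinv x (hsub x hx) h10) with h | h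
          · exact absurd h (hnotop x hx)
          · exact h), hmap]

theorem zip_pyRange_enumerate : ∀ (xs : List Int) (s : Int),
    (PySem.List.pyRange s (s + xs.length) 1).zip xs = PySem.List.enumerate xs s := by
  intro xs
  induction xs with
  | nil =>
    intro s
    rw [PySem.List.pyRange_one_eq_nil (by simp)]
    simp [PySem.List.enumerate_nil]
  | cons a t ih =>
    intro s
    have hlt : s < s + ((a :: t).length : Int) := by
      simp only [List.length_cons]
      push_cast
      omega
    rw [PySem.List.pyRange_one_cons hlt]
    have hb : s + ((a :: t).length : Int) = (s + 1) + (t.length : Int) := by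
      simp; ring
    rw [hb]
    have : ((s :: PySem.List.pyRange (s + 1) ((s + 1) + t.length) 1).zip (a :: t))
        = (s, a) :: ((PySem.List.pyRange (s + 1) ((s + 1) + t.length) 1).zip t) := rfl
    rw [this, ih (s + 1), PySem.List.enumerate_cons]

theorem arr_enumerate_zero (xs : List Int) :
    arr (PySem.List.enumerate xs 0) 0 = PySem.List.enumerate xs 0 := by
  unfold arr
  have h1 : (PySem.List.enumerate xs 0).filter (fun e => decide (0 ≤ e.1))
      = PySem.List.enumerate xs 0 := by
    rw [List.filter_eq_self]
    intro x hx
    obtain ⟨k, hk, rfl⟩ := (PySem.List.mem_enumerate_iff xs 0 x).mp hx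
    simp
  have h2 : (PySem.List.enumerate xs 0).filter (fun e => decide (e.1 < 0)) = [] := by
    rw [List.filter_eq_nil_iff]
    intro x hx
    obtain ⟨k, hk, rfl⟩ := (PySem.List.mem_enumerate_iff xs 0 x).mp hx
    simp
  rw [h1, h2, List.append_nil]

-- ===== VERDICT (by name: the statement is the Claim_ definition above) =====
theorem solution_spec : Claim_equal_solution := by
  intro priorities location _hdom
  unfold Spec_solution solution solution_alt
  set E := PySem.List.enumerate priorities 0 with hE
  set classes := PySem.List.sorted
    (PySem.Set.ofList (priorities.filter (fun q => decide (q < 10)))) (fun x => x) true with hcls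
  have hmemcls : ∀ x : Int, x ∈ classes ↔ x ∈ priorities ∧ x < 10 := by
    intro x
    rw [hcls]
    simp [PySem.List.mem_sorted, PySem.Set.mem_ofList, List.mem_filter]
  have hsnd : ∀ e ∈ E, e.2 ∈ priorities := by
    intro e he
    have : e.2 ∈ E.map (·.2) := List.mem_map.mpr ⟨e, he, rfl⟩
    rwa [hE, PySem.List.map_snd_enumerate] at this
  -- step 1: A's loop is the clean simulation on (index, priority) pairs
  have h1 : solutionLoop location ((priorities.length + 1) * (priorities.length + 1))
        (priorities.foldl (fun d i => d.modify i 0 (· + 1)) PySem.Dict.empty)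
        priorities (PySem.List.pyRange 0 (priorities.length) 1) 0
      = simLoop location ((priorities.length + 1) * (priorities.length + 1))
        ((PySem.List.pyRange 0 (priorities.length) 1).zip priorities) 0 := by
    apply loop_eq_sim
    · rw [PySem.List.length_pyRange_one]
      simp
    · intro v
      have hc : priorities.foldl (fun d i => d.modify i 0 (· + 1)) PySem.Dict.empty
          = PySem.Dict.counter priorities := by
        rw [PySem.Dict.counter_eq_foldl]
      rw [hc]
      exact PySem.Dict.getD_counter priorities v
  have hzipE : (PySem.List.pyRange 0 (priorities.length) 1).zip priorities = E := by
    have := zip_pyRange_enumerate priorities 0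
    simpa using this
  -- step 2: the rotating simulation agrees with the rotation-free reference
  have h2 : simLoop location ((priorities.length + 1) * (priorities.length + 1)) E 0
      = refLoop location priorities.length E 0 := by
    apply sim_eq_ref
    · rw [hE, PySem.List.length_enumerate]
    · nlinarith
  -- step 3: the reference agrees with B's descending threshold sweep
  have h3 : refLoop location E.length (arr E 0) 0
      = sweepLoop priorities location classes ((arr E 0).map (·.1)) 0 := by
    apply sweep_eq
    · rw [hE]
      exact PySem.List.pairwise_lt_enumerate priorities 0
    · intro x hx
      exact pyGetD_of_mem_enumerate priorities x hx
    · have hperm : classes.Perm (PySem.Set.ofList (priorities.filter (fun q => decide (q < 10)))) :=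
        PySem.List.sorted_perm _ _ _
      have hnd : classes.Nodup := hperm.nodup_iff.mpr (PySem.Set.nodup_ofList _)
      have hord : classes.Pairwise (fun a b => b ≤ a) :=
        PySem.List.sorted_pairwise_rev _ _
      exact List.Pairwise.imp₂ (fun a b hab hne => lt_of_le_of_ne hab (Ne.symm hne)) hord hnd
    · intro c hc
      exact ((hmemcls c).mp hc).2
    · intro x hx h10
      exact (hmemcls x.2).mpr ⟨hsnd x hx, h10⟩
  have hqueue : E.map (·.1) = PySem.List.pyRange 0 priorities.length 1 := by
    rw [← hzipE]
    apply List.map_fst_zip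
    rw [PySem.List.length_pyRange_one]
    simp
  have hElen : E.length = priorities.length := by rw [hE, PySem.List.length_enumerate]
  rw [h1, hzipE, h2]
  rw [arr_enumerate_zero priorities] at h3
  rw [hElen, hqueue] at h3
  exact h3
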